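-- pv_equiv track=rewrite | github.com/yiyabo/GAgent | scripts/build_deeppl_phagescope_paper_assets.py | merge_deeppl_raw_rows
-- ===== SOURCE A (Python) =====
-- from typing import Any, Dict, Iterable, List, Optional, Tuple
--
-- def merge_deeppl_raw_rows(existing_rows: List[Dict[str, Any]], supplemental_rows: List[Dict[str, Any]]) -> List[Dict[str, Any]]:
--     merged: Dict[str, Dict[str, Any]] = {}
--     for row in existing_rows:
--         fasta_file = str(row.get("FASTA File") or "").strip()
--         if fasta_file:
--             merged[fasta_file] = {
--                 "FASTA File": fasta_file,
--                 "Probability": row.get("Probability", ""),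
--                 "Prediction": row.get("Prediction", ""),
--             }
--     for row in supplemental_rows:
--         fasta_file = str(row.get("FASTA File") or "").strip()
--         if fasta_file:
--             merged[fasta_file] = {
--                 "FASTA File": fasta_file,
--                 "Probability": row.get("Probability", ""),
--                 "Prediction": row.get("Prediction", ""),
--             }
--     return [merged[key] for key in sorted(merged)]
-- ===== SOURCE B (Python) =====
-- from typing import Any, Dict, List
--
--
-- def merge_deeppl_raw_rows(existing_rows: List[Dict[str, Any]], supplemental_rows: List[Dict[str, Any]]) -> List[Dict[str, Any]]:
--     pairs = []
--     for row in existing_rows + supplemental_rows: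
--         fasta = str(row.get("FASTA File") or "").strip()
--         if fasta:
--             pairs.append((fasta, {
--                 "FASTA File": fasta,
--                 "Probability": row.get("Probability", ""),
--                 "Prediction": row.get("Prediction", ""),
--             }))
--     pairs.sort(key=lambda item: item[0])  # stable: existing-before-supplemental order kept inside equal keys
--     out = []
--     for i, (key, rec) in enumerate(pairs):
--         if i + 1 == len(pairs) or pairs[i + 1][0] != key:
--             out.append(rec)
--     return out
-- ===== Notes on version B (the rewrite author's own statement) =====
-- stated objective: alternative
-- what changed: B replaces A's dict-overwrite-then-sort-keys merge by a sort-then-dedup pass: it collects the normalized (key, record) pairs of all rows, stably sorts them by FASTA key, and keeps the last entry of each equal-key run.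
import Mathlib
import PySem

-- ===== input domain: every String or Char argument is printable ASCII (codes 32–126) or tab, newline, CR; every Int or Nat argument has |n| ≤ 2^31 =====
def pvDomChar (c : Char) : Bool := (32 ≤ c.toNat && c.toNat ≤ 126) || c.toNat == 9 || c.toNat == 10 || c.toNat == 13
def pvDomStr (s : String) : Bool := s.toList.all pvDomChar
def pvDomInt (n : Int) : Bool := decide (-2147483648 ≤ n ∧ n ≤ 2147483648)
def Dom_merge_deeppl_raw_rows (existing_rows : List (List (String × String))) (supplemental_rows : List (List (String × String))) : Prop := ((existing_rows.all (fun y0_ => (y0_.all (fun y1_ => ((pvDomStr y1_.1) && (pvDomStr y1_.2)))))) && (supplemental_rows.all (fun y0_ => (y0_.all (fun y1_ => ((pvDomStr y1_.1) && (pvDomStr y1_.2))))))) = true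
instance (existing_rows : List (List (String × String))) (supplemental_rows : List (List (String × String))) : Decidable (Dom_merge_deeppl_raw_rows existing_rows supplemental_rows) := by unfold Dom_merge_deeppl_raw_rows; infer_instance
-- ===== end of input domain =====

-- B replaces A's dict-overwrite-then-sort-keys merge by sort-then-dedup (stable sort by key, keep last of each run); objective: alternative, same cost.

-- shared normalization: both Pythons compute the same key/record expressions from a row
def pvKeyOf (row : List (String × String)) : String :=
  PySem.Str.strip ((row.lookup "FASTA File").getD "")

def pvRec (row : List (String × String)) : List (String × String) :=
  [("FASTA File", pvKeyOf row),
   ("Probability", (row.lookup "Probability").getD ""),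
   ("Prediction", (row.lookup "Prediction").getD "")]

-- ===== PORT A =====
def merge_deeppl_raw_rows (existing_rows : List (List (String × String))) (supplemental_rows : List (List (String × String))) : List (List (String × String)) :=
  -- the identical loop body of A's two loops
  let step : PySem.Dict String (List (String × String)) → List (String × String) → PySem.Dict String (List (String × String)) :=
    fun merged row =>
      let fasta := pvKeyOf row
      if fasta ≠ "" then merged.insert fasta (pvRec row) else merged
  let m1 := existing_rows.foldl step PySem.Dict.empty
  let merged := supplemental_rows.foldl step m1
  (PySem.List.sorted merged.keys (fun k => k) false).map (fun k => (merged.get? k).getD [])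

-- ===== PORT B =====
-- Source B's final loop: keep a pair iff it is last or the next key differs
def pvKeepLast : List (String × List (String × String)) → List (List (String × String))
  | [] => []
  | [p] => [p.2]
  | p :: q :: rest => if q.1 ≠ p.1 then p.2 :: pvKeepLast (q :: rest) else pvKeepLast (q :: rest)

def merge_deeppl_raw_rows_alt (existing_rows : List (List (String × String))) (supplemental_rows : List (List (String × String))) : List (List (String × String)) :=
  let pairs := (existing_rows ++ supplemental_rows).foldl
    (fun acc row =>
      let fasta := pvKeyOf row
      if fasta ≠ "" then acc ++ [(fasta, pvRec row)] else acc) []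
  pvKeepLast (PySem.List.sorted pairs (fun item => item.1) false)

-- ===== PRECONDITION & SPEC =====
def Spec_merge_deeppl_raw_rows (existing_rows : List (List (String × String))) (supplemental_rows : List (List (String × String))) (out : List (List (String × String))) : Prop := out = merge_deeppl_raw_rows_alt existing_rows supplemental_rows
instance (existing_rows : List (List (String × String))) (supplemental_rows : List (List (String × String))) (out : List (List (String × String))) : Decidable (Spec_merge_deeppl_raw_rows existing_rows supplemental_rows out) := by unfold Spec_merge_deeppl_raw_rows; infer_instance

-- ===== CLAIM (what is proved, stated in full; the proofs are below) =====
def Claim_equal_merge_deeppl_raw_rows : Prop := ∀ (existing_rows : List (List (String × String))) (supplemental_rows : List (List (String × String))), Dom_merge_deeppl_raw_rows existing_rows supplemental_rows → Spec_merge_deeppl_raw_rows existing_rows supplemental_rows (merge_deeppl_raw_rows existing_rows supplemental_rows)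

-- ===== LEMMAS AND PROOFS =====

-- last record stored under key k among the pairs ps (last-wins)
def pvLast? (ps : List (String × List (String × String))) (k : String) : Option (List (String × String)) :=
  ((ps.filter (fun p => p.1 == k)).getLast?).map (·.2)

-- A's dict after the insert loop looks up the LAST pair with the given key
theorem pv_get?_foldl_insert (ps : List (String × List (String × String)))
    (d : PySem.Dict String (List (String × String))) (k : String) :
    (ps.foldl (fun d p => d.insert p.1 p.2) d).get? k = (pvLast? ps k).or (d.get? k) := by
  induction ps generalizing d with
  | nil => simp [pvLast?]
  | cons p ps ih =>
    rw [List.foldl_cons, ih]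
    by_cases hpk : p.1 = k
    · subst hpk
      simp only [pvLast?, List.filter_cons, BEq.rfl, if_pos]
      rcases hf : ps.filter (fun q => q.1 == p.1) with _ | ⟨a, l⟩
      · simp [PySem.Dict.get?_insert_self, hf]
      · obtain ⟨b, hb⟩ := List.getLast?_isSome.mpr (List.cons_ne_nil a l) |> Option.isSome_iff_exists.mp
        simp [hf, List.getLast?_cons_cons, hb]
    · have : (d.insert p.1 p.2).get? k = d.get? k := PySem.Dict.get?_insert_of_ne d p.2 (by exact fun h => hpk h.symm)
      rw [this]
      simp [pvLast?, hpk]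

-- stability of the stable sort, one step: filtering on one key commutes with an insertion
theorem pv_filter_insertBy (x : String × List (String × String))
    (ys : List (String × List (String × String)))
    (h : ys.Pairwise (fun a b => a.1 ≤ b.1)) (k : String) :
    (PySem.List.insertBy (fun a b => decide (a.1 < b.1)) x ys).filter (fun p => p.1 == k)
      = if x.1 == k then ys.filter (fun p => p.1 == k) ++ [x]
        else ys.filter (fun p => p.1 == k) := by
  induction ys with
  | nil =>
    simp only [PySem.List.insertBy, List.filter_cons, List.filter_nil]
    split <;> simp_all
  | cons y ys ih =>
    rw [List.pairwise_cons] at h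
    by_cases hlt : x.1 < y.1
    · simp only [PySem.List.insertBy, decide_eq_true_eq, if_pos hlt]
      by_cases hxk : x.1 = k
      · have hnil : (y :: ys).filter (fun p => p.1 == k) = [] := by
          apply List.filter_eq_nil_iff.mpr
          intro a ha
          have hya : y.1 ≤ a.1 := by
            rcases List.mem_cons.mp ha with rfl | ha'
            · exact le_refl _
            · exact h.1 a ha'
          simp only [beq_iff_eq]
          intro hak
          exact absurd (lt_of_lt_of_le hlt hya) (by simp [hak, hxk])
        have hx1 : (x :: y :: ys).filter (fun p => p.1 == k) = [x] := by
          rw [List.filter_cons, if_pos (by simpa using hxk), hnil]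
        rw [hx1, hnil, if_pos (by simpa using hxk), List.nil_append]
      · simp only [List.filter_cons, beq_iff_eq, if_neg hxk]
    · simp only [PySem.List.insertBy, decide_eq_true_eq, if_neg hlt, List.filter_cons]
      rw [ih h.2]
      split <;> split <;> simp

-- stability of the sort, per key: filtering on one key commutes with sorting
theorem pv_filter_sorted (ps : List (String × List (String × String))) (k : String) :
    (PySem.List.sorted ps (fun p => p.1) false).filter (fun p => p.1 == k)
      = ps.filter (fun p => p.1 == k) := by
  induction ps using List.reverseRecOn with
  | nil => simp
  | append_singleton ps x ih =>
    rw [PySem.List.sorted_eq_foldl_insertBy, List.foldl_append, List.foldl_cons, List.foldl_nil,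
      ← PySem.List.sorted_eq_foldl_insertBy,
      pv_filter_insertBy x _ (PySem.List.sorted_pairwise ps (fun p => p.1)) k,
      List.filter_append, ih]
    split <;> simp_all

-- MAIN: mapping last-wins lookups over the strictly sorted key list IS keep-last over a key-sorted pair list
theorem pv_main (qs : List (String × List (String × String))) (K : List String)
    (hq : qs.Pairwise (fun a b => a.1 ≤ b.1))
    (hK : K.Pairwise (· < ·))
    (hmem : ∀ k, k ∈ K ↔ k ∈ qs.map (·.1)) :
    K.map (fun k => (pvLast? qs k).getD []) = pvKeepLast qs := by
  induction qs using pvKeepLast.induct generalizing K with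
  | case1 =>
    have : K = [] := List.eq_nil_iff_forall_not_mem.mpr (fun k hk => by simpa using (hmem k).mp hk)
    simp [this, pvKeepLast]
  | case2 p =>
    have hKe : K = [p.1] := by
      cases K with
      | nil => exact absurd ((hmem p.1).mpr (by simp)) (by simp)
      | cons k0 K' =>
        have hk0 : k0 = p.1 := by have := (hmem k0).mp (by simp); simpa using this
        subst hk0
        cases K' with
        | nil => rfl
        | cons k1 K'' =>
          have hk1 : k1 = p.1 := by have := (hmem k1).mp (by simp); simpa using this
          rw [List.pairwise_cons] at hK
          exact absurd (hK.1 k1 (by simp)) (by simp [hk1])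
    subst hKe
    simp [pvKeepLast, pvLast?]
  | case3 p q rest hne ih =>
    -- q.1 ≠ p.1, hence p.1 < q.1 ≤ every key of q :: rest
    rw [List.pairwise_cons] at hq
    have hlt : ∀ m ∈ (q :: rest).map (·.1), p.1 < m := by
      intro m hm
      have hple : p.1 ≤ m := by
        obtain ⟨a, ha, rfl⟩ := List.mem_map.mp hm
        exact hq.1 a ha
      rcases List.mem_map.mp hm with ⟨a, ha, rfl⟩
      rcases List.mem_cons.mp ha with rfl | ha'
      · exact lt_of_le_of_ne hple (fun h => hne h.symm)
      · have : q.1 ≤ a.1 := (List.pairwise_cons.mp hq.2).1 a ha'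
        have hpq : p.1 < q.1 := lt_of_le_of_ne (hq.1 q (by simp)) (fun h => hne h.symm)
        exact lt_of_lt_of_le hpq this
    have hfilq : (q :: rest).filter (fun r => r.1 == p.1) = [] := by
      apply List.filter_eq_nil_iff.mpr
      intro a ha
      have := hlt a.1 (List.mem_map.mpr ⟨a, ha, rfl⟩)
      simp only [beq_iff_eq]
      exact fun h => absurd this (by simp [h])
    obtain ⟨K', hKe⟩ : ∃ K', K = p.1 :: K' := by
      cases K with
      | nil => exact absurd ((hmem p.1).mpr (by simp)) (by simp)
      | cons k0 K' =>
        refine ⟨K', ?_⟩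
        by_cases hk0 : k0 = p.1
        · rw [hk0]
        · have hk0m := (hmem k0).mp (by simp)
          have hk0gt : p.1 < k0 := by
            rcases (by simpa using hk0m : k0 = p.1 ∨ k0 ∈ (q :: rest).map (·.1)) with h | h
            · exact absurd h hk0
            · exact hlt k0 h
          have hp1m := (hmem p.1).mpr (by simp)
          rcases List.mem_cons.mp hp1m with h | h
          · exact absurd h.symm hk0
          · have := (List.pairwise_cons.mp hK).1 p.1 h
            exact absurd (lt_trans hk0gt this) (lt_irrefl _)
    subst hKe
    rw [List.pairwise_cons] at hK
    have hmem' : ∀ k, k ∈ K' ↔ k ∈ (q :: rest).map (·.1) := by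
      intro k
      constructor
      · intro hk
        have hkgt := hK.1 k hk
        rcases (by simpa using (hmem k).mp (by simp [hk]) : k = p.1 ∨ k ∈ (q :: rest).map (·.1)) with h | h
        · exact absurd (h ▸ hkgt) (lt_irrefl _)
        · exact h
      · intro hk
        have hmk : k ∈ List.map (fun x => x.1) (p :: q :: rest) := by
          rw [List.map_cons]; exact List.mem_cons_of_mem _ hk
        have := (hmem k).mpr hmk
        rcases List.mem_cons.mp this with h | h
        · exact absurd (h ▸ hlt k hk) (lt_irrefl _)
        · exact h
    have hhead : pvLast? (p :: q :: rest) p.1 = some p.2 := by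
      simp [pvLast?, hfilq]
    have htail : ∀ k ∈ K', pvLast? (p :: q :: rest) k = pvLast? (q :: rest) k := by
      intro k hk
      have hkp : ¬ p.1 = k := fun h => absurd (h ▸ hK.1 k hk) (lt_irrefl _)
      simp [pvLast?, List.filter_cons, hkp]
    rw [List.map_cons, hhead, pvKeepLast, if_pos hne,
      List.map_congr_left (fun k hk => by rw [htail k hk]),
      ih K' hq.2 hK.2 hmem']
    rfl
  | case4 p q rest hne ih =>
    have hpq : p.1 = q.1 := by by_contra h; exact hne (fun hh => h hh.symm)
    rw [List.pairwise_cons] at hq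
    have heq : ∀ k, pvLast? (p :: q :: rest) k = pvLast? (q :: rest) k := by
      intro k
      by_cases hk : p.1 = k
      · have hqm : q ∈ (q :: rest).filter (fun r => r.1 == k) :=
          List.mem_filter.mpr ⟨by simp, by simp [← hpq, hk]⟩
        rcases hf : (q :: rest).filter (fun r => r.1 == k) with _ | ⟨a, l⟩
        · rw [hf] at hqm; simp at hqm
        · simp [pvLast?, hk, hf, List.getLast?_cons_cons]
      · simp [pvLast?, List.filter_cons, hk]
    have hmem' : ∀ k, k ∈ K ↔ k ∈ (q :: rest).map (·.1) := by
      intro k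
      rw [hmem k]
      simp [hpq]
    rw [pvKeepLast, if_neg hne, List.map_congr_left (fun k _ => by rw [heq k]),
      ih K hq.2 hK hmem']

-- assembly: both ports reduce to the same normalized pair list
theorem pv_ab_eq (e s : List (List (String × String))) :
    merge_deeppl_raw_rows e s = merge_deeppl_raw_rows_alt e s := by
  have hstep : ∀ (l : List (List (String × String))) (d : PySem.Dict String (List (String × String))),
      List.foldl (fun merged row => if pvKeyOf row ≠ "" then merged.insert (pvKeyOf row) (pvRec row) else merged) d l
        = ((l.filter (fun row => decide (pvKeyOf row ≠ ""))).map
            (fun row => (pvKeyOf row, pvRec row))).foldl (fun d p => d.insert p.1 p.2) d := by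
    intro l d
    rw [List.foldl_map]
    exact PySem.List.foldl_ite_eq_foldl_filter _ _ _ _
  have hBfold : ∀ (l : List (List (String × String))) (acc : List (String × List (String × String))),
      List.foldl (fun acc row => if pvKeyOf row ≠ "" then acc ++ [(pvKeyOf row, pvRec row)] else acc) acc l
        = acc ++ (l.filter (fun row => decide (pvKeyOf row ≠ ""))).map (fun row => (pvKeyOf row, pvRec row)) :=
    fun l acc => PySem.List.foldl_append_ite _ _ _ _
  unfold merge_deeppl_raw_rows merge_deeppl_raw_rows_alt
  simp only []
  rw [← List.foldl_append, hstep, hBfold, List.nil_append]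
  set psL := (((e ++ s).filter (fun row => decide (pvKeyOf row ≠ ""))).map
    (fun row => (pvKeyOf row, pvRec row))) with hpsL
  set D := psL.foldl (fun d p => d.insert p.1 p.2) PySem.Dict.empty with hD
  set qs := PySem.List.sorted psL (fun item => item.1) false with hqs
  have hget : ∀ k, D.get? k = pvLast? qs k := by
    intro k
    rw [hD, pv_get?_foldl_insert, PySem.Dict.get?_empty, Option.or_none]
    unfold pvLast?
    rw [hqs, pv_filter_sorted]
  have hkeys : D.keys = PySem.Set.ofList (psL.map Prod.fst) := by
    rw [hD, PySem.Dict.keys_foldl_insert_key, PySem.Dict.keys_empty,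
      PySem.Set.ofList_eq_foldl]
    rfl
  have hnd : D.keys.Nodup := by
    rw [hkeys]; exact PySem.Set.nodup_ofList _
  set K := PySem.List.sorted D.keys (fun k => k) false with hK
  have hKperm : K.Perm D.keys := PySem.List.sorted_perm D.keys (fun k => k) false
  have hKlt : K.Pairwise (· < ·) := by
    have h1 := PySem.List.sorted_pairwise D.keys (fun k => k)
    have h2 : K.Nodup := hKperm.symm.nodup hnd
    exact (h1.and h2).imp (fun h => lt_of_le_of_ne h.1 h.2)
  have hmem : ∀ k, k ∈ K ↔ k ∈ qs.map (·.1) := by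
    intro k
    rw [hKperm.mem_iff, hkeys, PySem.Set.mem_ofList]
    constructor
    · intro h
      obtain ⟨p, hp, rfl⟩ := List.mem_map.mp h
      exact List.mem_map.mpr ⟨p, (PySem.List.mem_sorted _ _ _ _).mpr hp, rfl⟩
    · intro h
      obtain ⟨p, hp, rfl⟩ := List.mem_map.mp h
      exact List.mem_map.mpr ⟨p, (PySem.List.mem_sorted _ _ _ _).mp hp, rfl⟩
  calc K.map (fun k => (D.get? k).getD [])
      = K.map (fun k => (pvLast? qs k).getD []) :=
        List.map_congr_left (fun k _ => by rw [hget k])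
    _ = pvKeepLast qs := pv_main qs K (PySem.List.sorted_pairwise psL (fun p => p.1)) hKlt hmem

-- ===== VERDICT (by name: the statement is the Claim_ definition above) =====
theorem merge_deeppl_raw_rows_spec : Claim_equal_merge_deeppl_raw_rows := by
  intro existing_rows supplemental_rows _
  unfold Spec_merge_deeppl_raw_rows
  exact pv_ab_eq existing_rows supplemental_rows
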